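-- pv_equiv track=rewrite | github.com/adsabs/adsabs | adsabs/core/solr/__init__.py | _extract_controlled_keywords
-- ===== SOURCE A (Python) =====
-- def _extract_controlled_keywords(solrdoc):
--     kws = {}
--     if 'keyword' in solrdoc and 'keyword_schema' in solrdoc and \
--         len(solrdoc['keyword']) == len(solrdoc['keyword_schema']):
--         for schema,kw in zip(solrdoc['keyword_schema'], solrdoc['keyword']):
--             if schema == '-':
--                 schema = 'Free Keywords'
--             if schema not in kws:
--                 kws[schema] = set()
--             kws[schema].add(kw)
--         for k,v in kws.items():
--             kws[k] = sorted(v)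
--         del solrdoc['keyword_schema']
--     return kws
-- ===== SOURCE B (Python) =====
-- def _extract_controlled_keywords(solrdoc):
--     kws = {}
--     if 'keyword' in solrdoc and 'keyword_schema' in solrdoc and \
--             len(solrdoc['keyword']) == len(solrdoc['keyword_schema']):
--         pairs = [('Free Keywords' if s == '-' else s, k)
--                  for s, k in zip(solrdoc['keyword_schema'], solrdoc['keyword'])]
--         for schema in dict.fromkeys(s for s, _ in pairs):
--             group = sorted(k for s, k in pairs if s == schema)
--             kws[schema] = [k for i, k in enumerate(group)
--                            if i == 0 or k != group[i - 1]]
--         del solrdoc['keyword_schema']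
--     return kws
-- ===== Notes on version B (the rewrite author's own statement) =====
-- stated objective: alternative
-- what changed: Replaces A's incremental dict-of-sets plus a second sorting pass by building renamed (schema, keyword) pairs once and, for each first-occurrence schema, sorting its group and dropping adjacent duplicates (dedup via sorted order instead of sets); the keyword_schema deletion side effect is kept.
import Mathlib
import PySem

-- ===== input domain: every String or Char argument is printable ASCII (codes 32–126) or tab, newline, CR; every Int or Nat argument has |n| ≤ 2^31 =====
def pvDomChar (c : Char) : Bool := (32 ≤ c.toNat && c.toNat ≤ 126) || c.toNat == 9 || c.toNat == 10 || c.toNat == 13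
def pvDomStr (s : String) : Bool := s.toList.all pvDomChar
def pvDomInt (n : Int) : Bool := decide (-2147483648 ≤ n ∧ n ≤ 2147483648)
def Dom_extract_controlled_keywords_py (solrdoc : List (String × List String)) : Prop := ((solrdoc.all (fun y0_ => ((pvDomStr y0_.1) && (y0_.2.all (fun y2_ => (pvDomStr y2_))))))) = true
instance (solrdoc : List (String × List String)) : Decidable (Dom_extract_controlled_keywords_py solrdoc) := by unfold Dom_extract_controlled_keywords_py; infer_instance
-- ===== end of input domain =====

-- B groups by a single sort + adjacent-duplicate skip instead of A's incremental dict of sets;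
-- objective: alternative decomposition. Both Pythons also delete solrdoc['keyword_schema'] in the
-- guarded branch (the same mutation); the equivalence proved here is about the RETURN value.

-- ===== PORT A =====
-- shared by both ports (both Pythons contain the literal rename expression)
def ecgRename (s : String) : String := if s == "-" then "Free Keywords" else s

def extract_controlled_keywords_py (solrdoc : List (String × List String)) : List (String × List String) :=
  let sd := PySem.Dict.mk solrdoc
  if sd.contains "keyword" && sd.contains "keyword_schema" &&
      ((sd.getD "keyword" []).length == (sd.getD "keyword_schema" []).length) then
    -- for schema,kw in zip(...): if schema not in kws: kws[schema]=set(); kws[schema].add(kw)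
    let d := ((sd.getD "keyword_schema" []).zip (sd.getD "keyword" [])).foldl
      (fun d p => d.modify (ecgRename p.1) [] (fun s => PySem.Set.add s p.2))
      (PySem.Dict.empty)
    -- for k,v in kws.items(): kws[k] = sorted(v)   (overwrite of an existing key keeps its position
    -- and touches only that value, so the loop is a value map over the items)
    d.items.map (fun q => (q.1, PySem.List.sorted q.2 (fun x => x) false))
  else []

-- ===== PORT B =====
-- [k for i,k in enumerate(group) if i == 0 or k != group[i-1]]  (skip adjacent duplicates)
def ecgSkipAdj (prev : String) : List String → List String
  | [] => []
  | y :: ys => if y == prev then ecgSkipAdj y ys else y :: ecgSkipAdj y ys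

def ecgDedupSorted : List String → List String
  | [] => []
  | x :: xs => x :: ecgSkipAdj x xs

def extract_controlled_keywords_py_alt (solrdoc : List (String × List String)) : List (String × List String) :=
  let sd := PySem.Dict.mk solrdoc
  if sd.contains "keyword" && sd.contains "keyword_schema" &&
      ((sd.getD "keyword" []).length == (sd.getD "keyword_schema" []).length) then
    let pairs := ((sd.getD "keyword_schema" []).zip (sd.getD "keyword" [])).map
      (fun p => (ecgRename p.1, p.2))
    (PySem.List.dedup (pairs.map (fun p => p.1))).map (fun schema =>
      (schema,
        ecgDedupSorted
          (PySem.List.sorted ((pairs.filter (fun p => p.1 == schema)).map (fun p => p.2))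
            (fun x => x) false)))
  else []

-- ===== PRECONDITION & SPEC =====
def Spec_extract_controlled_keywords_py (solrdoc : List (String × List String)) (out : List (String × List String)) : Prop := out = extract_controlled_keywords_py_alt solrdoc
instance (solrdoc : List (String × List String)) (out : List (String × List String)) : Decidable (Spec_extract_controlled_keywords_py solrdoc out) := by unfold Spec_extract_controlled_keywords_py; infer_instance

-- ===== CLAIM (what is proved, stated in full; the proofs are below) =====
def Claim_equal_extract_controlled_keywords_py : Prop := ∀ (solrdoc : List (String × List String)), Dom_extract_controlled_keywords_py solrdoc → Spec_extract_controlled_keywords_py solrdoc (extract_controlled_keywords_py solrdoc)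

-- ===== LEMMAS AND PROOFS =====

theorem ecg_getD_foldl_modify_add (l : List (String × String)) (d : PySem.Dict String (List String)) (c : String) :
    (l.foldl (fun d p => d.modify (ecgRename p.1) [] (fun s => PySem.Set.add s p.2)) d).getD c []
      = PySem.Set.update (d.getD c []) ((l.filter (fun p => ecgRename p.1 == c)).map (fun p => p.2)) := by
  induction l generalizing d with
  | nil => simp [PySem.Set.update]
  | cons p t ih =>
    simp only [List.foldl_cons, ih, List.filter_cons]
    by_cases h : ecgRename p.1 = c
    · subst h
      simp [PySem.Set.update]
    · have h2 : ¬ c = ecgRename p.1 := fun hc => h hc.symm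
      simp [PySem.Dict.getD_modify, h, h2]

theorem ecg_mem_skipAdj (prev : String) (l : List String) (x : String) :
    x ∈ prev :: ecgSkipAdj prev l ↔ x ∈ prev :: l := by
  induction l generalizing prev with
  | nil => simp [ecgSkipAdj]
  | cons y ys ih =>
    by_cases h : y = prev
    · subst h
      simp only [ecgSkipAdj, beq_self_eq_true, if_true]
      have := ih y
      simp only [List.mem_cons] at this ⊢
      tauto
    · simp only [ecgSkipAdj, beq_iff_eq, h, if_false]
      have := ih y
      simp only [List.mem_cons] at this ⊢
      tauto

theorem ecg_pairwise_skipAdj (prev : String) (l : List String)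
    (hp : l.Pairwise (· ≤ ·)) (hge : ∀ y ∈ l, prev ≤ y) :
    (prev :: ecgSkipAdj prev l).Pairwise (· < ·) := by
  induction l generalizing prev with
  | nil => simp [ecgSkipAdj]
  | cons y ys ih =>
    rcases List.pairwise_cons.mp hp with ⟨hy, hys⟩
    by_cases h : y = prev
    · subst h
      simp only [ecgSkipAdj, beq_self_eq_true, if_true]
      exact ih y hys hy
    · simp only [ecgSkipAdj, beq_iff_eq, h, if_false]
      have hlt : prev < y := lt_of_le_of_ne (hge y (List.mem_cons_self)) (Ne.symm h)
      have htail : (y :: ecgSkipAdj y ys).Pairwise (· < ·) := ih y hys hy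
      refine List.pairwise_cons.mpr ⟨?_, htail⟩
      intro z hz
      rcases List.mem_cons.mp hz with rfl | hz'
      · exact hlt
      · exact lt_trans hlt (List.rel_of_pairwise_cons htail hz')

-- sorted(set(g)) = adjacent-dedup of sorted(g)
theorem ecg_sorted_set_eq_dedupSorted (g : List String) :
    PySem.List.sorted (PySem.Set.ofList g) (fun x => x) false
      = ecgDedupSorted (PySem.List.sorted g (fun x => x) false) := by
  cases hs : PySem.List.sorted g (fun x => x) false with
  | nil =>
    have hg : g = [] := (PySem.List.sorted_eq_nil_iff g (fun x => x) false).mp hs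
    subst hg
    simp only [ecgDedupSorted, PySem.Set.ofList, List.foldl_nil]
    exact hs
  | cons m t =>
    have hpair : (PySem.List.sorted g (fun x => x) false).Pairwise (· ≤ ·) := by
      simpa using PySem.List.sorted_pairwise g (fun x => x)
    rw [hs] at hpair
    rcases List.pairwise_cons.mp hpair with ⟨hm, ht⟩
    have hlt : (m :: ecgSkipAdj m t).Pairwise (· < ·) := ecg_pairwise_skipAdj m t ht hm
    have hmemg : ∀ x, x ∈ m :: ecgSkipAdj m t ↔ x ∈ g := by
      intro x
      rw [ecg_mem_skipAdj, ← hs]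
      exact PySem.List.mem_sorted g (fun x => x) false x
    have hperm : (m :: ecgSkipAdj m t).Perm (PySem.Set.ofList g) := by
      apply List.perm_of_nodup_nodup_toFinset_eq
      · exact (List.Pairwise.imp (fun h => ne_of_lt h) hlt : List.Pairwise (· ≠ ·) _)
      · exact PySem.Set.nodup_ofList g
      · ext x
        simp only [List.mem_toFinset]
        rw [hmemg, PySem.Set.mem_ofList]
    have hfin := PySem.List.sorted_eq_of_perm_of_pairwise_lt (PySem.Set.ofList g)
      (m :: ecgSkipAdj m t) (fun x => x) hperm hlt
    rw [hfin]
    simp [ecgDedupSorted]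

theorem extract_controlled_keywords_py_spec : Claim_equal_extract_controlled_keywords_py := by
  intro solrdoc _
  unfold Spec_extract_controlled_keywords_py extract_controlled_keywords_py extract_controlled_keywords_py_alt
  simp only []
  set sd := PySem.Dict.mk solrdoc with hsd
  by_cases hg : (sd.contains "keyword" && sd.contains "keyword_schema" &&
      ((sd.getD "keyword" []).length == (sd.getD "keyword_schema" []).length)) = true
  · rw [if_pos hg, if_pos hg]
    set z := ((sd.getD "keyword_schema" []).zip (sd.getD "keyword" [])) with hz
    set d := z.foldl (fun d p => d.modify (ecgRename p.1) [] (fun s => PySem.Set.add s p.2))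
      (PySem.Dict.empty) with hd
    have hnd : d.keys.Nodup := by
      rw [hd]
      exact PySem.Dict.nodup_keys_foldl_modify_key z (fun p => ecgRename p.1) []
        (fun _ p => fun s => PySem.Set.add s p.2) PySem.Dict.empty PySem.Dict.nodup_keys_empty
    have hkeys : d.keys = PySem.Set.ofList (z.map (fun p => ecgRename p.1)) := by
      rw [hd, PySem.Dict.keys_foldl_modify_key z (fun p => ecgRename p.1) []
        (fun _ p => fun s => PySem.Set.add s p.2) PySem.Dict.empty]
      simp [PySem.Dict.keys_empty, PySem.Set.update_nil_left]
    have hitems : d.items = d.keys.map (fun k => (k, d.getD k [])) :=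
      PySem.Dict.items_eq_map_keys d hnd []
    rw [hitems, List.map_map]
    -- B side: rewrite its pairs bookkeeping to the same key list and groups
    have hfst : (z.map (fun p => (ecgRename p.1, p.2))).map (fun p => p.1)
        = z.map (fun p => ecgRename p.1) := by
      simp [List.map_map]
    rw [hfst, PySem.List.dedup_eq_ofList, ← hkeys]
    apply List.map_congr_left
    intro k hk
    simp only [Function.comp]
    congr 1
    have hval : d.getD k [] = PySem.Set.ofList ((z.filter (fun p => ecgRename p.1 == k)).map (fun p => p.2)) := by
      rw [hd, ecg_getD_foldl_modify_add]
      simp [PySem.Dict.getD_empty, PySem.Set.update_nil_left]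
    have hgrp : ((z.map (fun p => (ecgRename p.1, p.2))).filter (fun p => p.1 == k)).map (fun p => p.2)
        = (z.filter (fun p => ecgRename p.1 == k)).map (fun p => p.2) := by
      rw [List.filter_map, List.map_map]
      rfl
    rw [hval, hgrp, ecg_sorted_set_eq_dedupSorted]
  · rw [if_neg hg, if_neg hg]
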